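-- pv_equiv track=rewrite | github.com/preethamsura/Quizoom | GenerateQuestions.py | set_dictionary
-- ===== SOURCE A (Python) =====
-- from collections import OrderedDict
--
-- def set_dictionary(sentences):
--     dictionary = OrderedDict()
--     count = 0
--     for sentence in sentences:
--         for word in sentence:
--             if word not in dictionary:
--                 dictionary[word] = count
--                 count += 1
--     return dictionary
-- ===== SOURCE B (Python) =====
-- from collections import OrderedDict
--
-- def set_dictionary(sentences):
--     # Sort-based: record each word's first-occurrence position by overwriting
--     # in a reverse pass (no membership test), sort the distinct words by that
--     # position, then pair them with their ranks.
--     words = [w for sentence in sentences for w in sentence]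
--     first = {}
--     for i, w in reversed(list(enumerate(words))):
--         first[w] = i
--     order = sorted(first, key=first.get)
--     return OrderedDict(zip(order, range(len(order))))
-- ===== Notes on version B (the rewrite author's own statement) =====
-- stated objective: alternative
-- what changed: Replaces A's single incremental pass with membership test and running counter by a sort-based algorithm: a reverse pass overwrites a dict with each word's first-occurrence position, the distinct words are sorted by that position, and zipped with their ranks; correct because first-occurrence positions are strictly increasing exactly in A's insertion order.
import Mathlib
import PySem

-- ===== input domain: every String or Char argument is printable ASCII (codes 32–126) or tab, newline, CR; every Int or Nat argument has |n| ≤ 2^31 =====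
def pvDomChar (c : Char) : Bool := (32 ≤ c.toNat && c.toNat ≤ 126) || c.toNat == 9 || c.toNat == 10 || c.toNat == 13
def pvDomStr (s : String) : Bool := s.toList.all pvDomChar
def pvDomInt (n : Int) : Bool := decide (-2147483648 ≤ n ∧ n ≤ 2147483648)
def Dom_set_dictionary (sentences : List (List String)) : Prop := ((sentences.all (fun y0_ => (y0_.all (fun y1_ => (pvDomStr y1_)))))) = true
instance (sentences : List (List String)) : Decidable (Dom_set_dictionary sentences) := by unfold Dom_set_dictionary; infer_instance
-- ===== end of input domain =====

-- B replaces A's incremental membership-test-plus-counter pass by a sort-based algorithm: distinct words as a set, sorted by first-occurrence position, zipped with ranks (alternative decomposition, similar cost).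


-- ===== PORT A =====
def set_dictionary (sentences : List (List String)) : List (String × Int) :=
  (sentences.foldl
    (fun st sentence =>
      sentence.foldl
        (fun st word =>
          if st.1.contains word then st else (st.1.insert word st.2, st.2 + 1))
        st)
    ((PySem.Dict.empty : PySem.Dict String Int), 0)).1.items

-- ===== PORT B =====
-- sorted(first, ...) iterates the dict's keys; first.get is ported as getD with an
-- unreachable default (every key of `first` is mapped), so this is exact.
def set_dictionary_alt (sentences : List (List String)) : List (String × Int) :=
  let words := sentences.flatMap (fun sentence => sentence)
  let first := (PySem.List.enumerate words 0).reverse.foldl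
    (fun d p => d.insert p.2 p.1) (PySem.Dict.empty : PySem.Dict String Int)
  let order := PySem.List.sorted first.keys (fun w => first.getD w 0) false
  order.zip (PySem.List.pyRange 0 (order.length : Int) 1)

-- ===== PRECONDITION & SPEC =====
def Spec_set_dictionary (sentences : List (List String)) (out : List (String × Int)) : Prop := out = set_dictionary_alt sentences
instance (sentences : List (List String)) (out : List (String × Int)) : Decidable (Spec_set_dictionary sentences out) := by unfold Spec_set_dictionary; infer_instance

-- ===== CLAIM (what is proved, stated in full; the proofs are below) =====
def Claim_equal_set_dictionary : Prop := ∀ (sentences : List (List String)), Dom_set_dictionary sentences → Spec_set_dictionary sentences (set_dictionary sentences)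

-- ===== LEMMAS AND PROOFS =====

-- first occurrences among ws of words not in `seen`, in order (proof-only helper)
def pvNews (seen : List String) : List String → List String
  | [] => []
  | w :: ws => if w ∈ seen then pvNews seen ws else w :: pvNews (seen ++ [w]) ws

theorem pvFoldlFoldl (f : PySem.Dict String Int × Int → String → PySem.Dict String Int × Int)
    (ss : List (List String)) (st : PySem.Dict String Int × Int) :
    ss.foldl (fun st s => s.foldl f st) st = (ss.flatMap (fun s => s)).foldl f st := by
  induction ss generalizing st with
  | nil => rfl
  | cons s ss ih => simp [List.foldl_append, ih]

theorem pvLoopItems (ws : List String) (d : PySem.Dict String Int) (c : Int)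
    (h : d.keys.Nodup) :
    (ws.foldl
      (fun st word =>
        if st.1.contains word then st else (st.1.insert word st.2, st.2 + 1)) (d, c)).1.items
    = d.items ++ (PySem.List.enumerate (pvNews d.keys ws) c).map (fun p => (p.2, p.1)) := by
  induction ws generalizing d c with
  | nil => simp [pvNews]
  | cons w ws ih =>
    by_cases hm : w ∈ d.keys
    · have hc : d.contains w = true := (PySem.Dict.contains_iff_mem_keys d w).mpr hm
      simp only [List.foldl_cons, hc, pvNews, hm, ite_true]
      exact ih d c h
    · have hc : d.contains w = false := by
        by_contra hne
        exact hm ((PySem.Dict.contains_iff_mem_keys d w).mp (by simpa using hne))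
      have hk : (d.insert w c).keys = d.keys ++ [w] :=
        PySem.Dict.keys_insert_of_not_contains d c hc
      have hi : (d.insert w c).items = d.items ++ [(w, c)] :=
        PySem.Dict.items_insert_of_not_contains d c hc
      have hnd : (d.insert w c).keys.Nodup := PySem.Dict.nodup_keys_insert d w c h
      simp only [List.foldl_cons, hc, pvNews, hm, ite_false, Bool.false_eq_true]
      rw [ih (d.insert w c) (c + 1) hnd, hi, hk]
      simp [PySem.List.enumerate_cons]

theorem pvNewsOfList (ws seen : List String) :
    ws.foldl PySem.Set.add seen = seen ++ pvNews seen ws := by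
  induction ws generalizing seen with
  | nil => simp [pvNews]
  | cons w ws ih =>
    by_cases hm : w ∈ seen
    · simp only [List.foldl_cons, PySem.Set.add_of_mem hm, pvNews, hm, ite_true]
      exact ih seen
    · simp only [List.foldl_cons, PySem.Set.add_of_not_mem hm, pvNews, hm, ite_false]
      rw [ih (seen ++ [w])]
      simp

theorem pvDedupEqNews (ws : List String) : PySem.Set.ofList ws = pvNews [] ws := by
  rw [PySem.Set.ofList_eq_foldl, pvNewsOfList]
  simp

theorem pvMemNews (ws : List String) : ∀ seen v, v ∈ pvNews seen ws → v ∉ seen ∧ v ∈ ws := by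
  induction ws with
  | nil => intro seen v h; simp [pvNews] at h
  | cons w ws ih =>
    intro seen v h
    by_cases hm : w ∈ seen
    · simp only [pvNews, hm, ite_true] at h
      obtain ⟨h1, h2⟩ := ih seen v h
      exact ⟨h1, by simp [h2]⟩
    · simp only [pvNews, hm, ite_false] at h
      rw [List.mem_cons] at h
      rcases h with h | h
      · subst h; exact ⟨hm, by simp⟩
      · obtain ⟨h1, h2⟩ := ih (seen ++ [w]) v h
        simp only [List.mem_append, List.mem_singleton, not_or] at h1
        exact ⟨h1.1, by simp [h2]⟩

theorem pvNewsPairwiseIdx (ws : List String) :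
    ∀ seen, (pvNews seen ws).Pairwise (fun a b => ws.idxOf a < ws.idxOf b) := by
  induction ws with
  | nil => intro seen; simp [pvNews]
  | cons w ws ih =>
    intro seen
    by_cases hm : w ∈ seen
    · simp only [pvNews, hm, ite_true]
      refine (ih seen).imp_of_mem ?_
      intro a b ha hb hab
      have hna : a ≠ w := fun h => (pvMemNews ws seen a ha).1 (h ▸ hm)
      have hnb : b ≠ w := fun h => (pvMemNews ws seen b hb).1 (h ▸ hm)
      rw [List.idxOf_cons_ne _ (Ne.symm hna), List.idxOf_cons_ne _ (Ne.symm hnb)]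
      omega
    · simp only [pvNews, hm, ite_false]
      refine List.Pairwise.cons ?_ ?_
      · intro v hv
        have h1 := (pvMemNews ws (seen ++ [w]) v hv).1
        have hvw : v ≠ w := fun h => h1 (by simp [h])
        rw [List.idxOf_cons_eq _ rfl, List.idxOf_cons_ne _ (Ne.symm hvw)]
        omega
      · refine (ih (seen ++ [w])).imp_of_mem ?_
        intro a b ha hb hab
        have hna : a ≠ w := fun h => (pvMemNews ws (seen ++ [w]) a ha).1 (by simp [h])
        have hnb : b ≠ w := fun h => (pvMemNews ws (seen ++ [w]) b hb).1 (by simp [h])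
        rw [List.idxOf_cons_ne _ (Ne.symm hna), List.idxOf_cons_ne _ (Ne.symm hnb)]
        omega

theorem pvFirstGetD (ws : List String) :
    ∀ (s : Int) (d : PySem.Dict String Int) (v : String), v ∈ ws →
      (((PySem.List.enumerate ws s).reverse.foldl
          (fun d p => d.insert p.2 p.1) d).getD v 0) = s + (ws.idxOf v : Int) := by
  induction ws with
  | nil => intro s d v h; simp at h
  | cons w ws ih =>
    intro s d v h
    rw [PySem.List.enumerate_cons]
    simp only [List.reverse_cons, List.foldl_append, List.foldl_cons, List.foldl_nil]
    by_cases hv : v = w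
    · subst hv
      rw [PySem.Dict.getD_insert]
      simp [List.idxOf_cons_eq _ rfl]
    · rw [PySem.Dict.getD_insert_of_ne _ _ _ hv]
      have hm : v ∈ ws := by
        rcases List.mem_cons.mp h with h' | h'
        · exact absurd h' hv
        · exact h'
      rw [ih (s + 1) d v hm, List.idxOf_cons_ne _ (Ne.symm hv)]
      push_cast
      omega

theorem pvFirstKeys (ws : List String) (s : Int) :
    ((PySem.List.enumerate ws s).reverse.foldl
        (fun d p => d.insert p.2 p.1)
        (PySem.Dict.empty : PySem.Dict String Int)).keys
      = PySem.Set.ofList ws.reverse := by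
  have h := PySem.Dict.keys_foldl_insert_key (ν := Int)
    ((PySem.List.enumerate ws s).reverse) (fun p => p.2) (fun _ p => p.1)
    (PySem.Dict.empty : PySem.Dict String Int)
  simp only [] at h
  rw [h]
  rw [show (PySem.Dict.empty : PySem.Dict String Int).keys = [] from rfl]
  rw [List.map_reverse]
  rw [show (PySem.List.enumerate ws s).map (fun p => p.2) = ws from
        PySem.List.map_snd_enumerate ws s]
  rw [PySem.Set.ofList_eq_foldl]
  rfl

theorem pvSortedKeys (ws : List String) :
    PySem.List.sorted
      ((PySem.List.enumerate ws 0).reverse.foldl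
          (fun d p => d.insert p.2 p.1)
          (PySem.Dict.empty : PySem.Dict String Int)).keys
      (fun w =>
        ((PySem.List.enumerate ws 0).reverse.foldl
            (fun d p => d.insert p.2 p.1)
            (PySem.Dict.empty : PySem.Dict String Int)).getD w 0) false
      = PySem.Set.ofList ws := by
  refine PySem.List.sorted_eq_of_perm_of_pairwise_lt _ _ _ ?_ ?_
  · rw [pvFirstKeys ws 0]
    refine (List.perm_ext_iff_of_nodup (PySem.Set.nodup_ofList ws)
      (PySem.Set.nodup_ofList ws.reverse)).mpr ?_
    intro a
    rw [PySem.Set.mem_ofList, PySem.Set.mem_ofList, List.mem_reverse]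
  · rw [pvDedupEqNews]
    refine (pvNewsPairwiseIdx ws []).imp_of_mem ?_
    intro a b ha hb hab
    have hma : a ∈ ws := (pvMemNews ws [] a ha).2
    have hmb : b ∈ ws := (pvMemNews ws [] b hb).2
    rw [pvFirstGetD ws 0 _ a hma, pvFirstGetD ws 0 _ b hmb]
    omega

theorem pvZipRange (xs : List String) (s : Int) :
    xs.zip (PySem.List.pyRange s (s + (xs.length : Int)) 1)
      = (PySem.List.enumerate xs s).map (fun p => (p.2, p.1)) := by
  induction xs generalizing s with
  | nil => simp [PySem.List.pyRange_one_eq_nil, PySem.List.enumerate_nil]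
  | cons x xs ih =>
    rw [PySem.List.pyRange_one_cons (by push_cast [List.length_cons]; omega), PySem.List.enumerate_cons]
    simp only [List.zip_cons_cons, List.map_cons]
    have h2 : s + ((x :: xs).length : Int) = (s + 1) + (xs.length : Int) := by
      push_cast [List.length_cons]; omega
    rw [h2, ih (s + 1)]

theorem pvZipRange0 (xs : List String) :
    xs.zip (PySem.List.pyRange 0 (xs.length : Int) 1)
      = (PySem.List.enumerate xs 0).map (fun p => (p.2, p.1)) := by
  have h := pvZipRange xs 0
  rwa [zero_add] at h

-- ===== VERDICT (by name: the statement is the Claim_ definition above) =====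
theorem set_dictionary_spec : Claim_equal_set_dictionary := by
  intro sentences _
  unfold Spec_set_dictionary set_dictionary set_dictionary_alt
  dsimp only []
  rw [pvFoldlFoldl, pvLoopItems _ _ _ (by simp)]
  rw [pvSortedKeys, pvZipRange0, pvDedupEqNews]
  simp [PySem.Dict.empty]
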